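-- pv_equiv track=rewrite | github.com/farhangus/vcf_visualizer | functions_variables.py | count_numbers_in_ranges
-- ===== SOURCE A (Python) =====
-- def count_numbers_in_ranges(numbers, ranges):
--     counts = [0] * len(ranges)
--
--     for number in numbers:
--         for i, range_ in enumerate(ranges):
--             if range_[0] <= number <= range_[1]:
--                 counts[i] += 1
--                 break
--     return counts
-- ===== SOURCE B (Python) =====
-- def count_numbers_in_ranges(numbers, ranges):
--     # Range-major sieve: each range in turn claims (and removes) the numbers it
--     # contains from the pool of still-unmatched numbers; first-match semantics
--     # holds because earlier ranges have already removed their numbers.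
--     remaining = list(numbers)
--     counts = []
--     for lo, hi in ranges:
--         c = 0
--         kept = []
--         for n in remaining:
--             if lo <= n <= hi:
--                 c += 1
--             else:
--                 kept.append(n)
--         counts.append(c)
--         remaining = kept
--     return counts
-- ===== Notes on version B (the rewrite author's own statement) =====
-- stated objective: alternative
-- what changed: B inverts the loop nesting: instead of scanning ranges for each number with break, it iterates over ranges and each range partitions the pool of still-unmatched numbers, counting those it contains and passing the rest on (a range-major sieve), which preserves first-match semantics because earlier ranges remove their numbers from the pool.
import Mathlib
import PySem

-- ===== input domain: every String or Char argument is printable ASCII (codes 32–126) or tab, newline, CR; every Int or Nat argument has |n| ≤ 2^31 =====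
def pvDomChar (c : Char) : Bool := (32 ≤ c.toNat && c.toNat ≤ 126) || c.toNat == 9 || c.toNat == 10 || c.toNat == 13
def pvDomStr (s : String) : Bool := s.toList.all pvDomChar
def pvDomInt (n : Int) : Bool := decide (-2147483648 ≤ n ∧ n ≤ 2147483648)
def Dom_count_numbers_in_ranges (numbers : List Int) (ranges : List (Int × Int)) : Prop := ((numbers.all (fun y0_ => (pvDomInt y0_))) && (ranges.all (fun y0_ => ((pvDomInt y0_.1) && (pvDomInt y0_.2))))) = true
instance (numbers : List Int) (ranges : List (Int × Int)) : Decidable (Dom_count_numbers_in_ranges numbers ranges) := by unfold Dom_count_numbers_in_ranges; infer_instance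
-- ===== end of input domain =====

-- B inverts the loop nesting: a range-major sieve where each range claims and removes its
-- numbers from the pool of still-unmatched numbers; objective: alternative algorithm, same cost.

-- ===== PORT A =====
-- inner 'for i, range_ in enumerate(ranges): if …: counts[i] += 1; break'
def pvInnerA (number : Int) (counts : List Int) (i : Nat) (rs : List (Int × Int)) : List Int :=
  match rs with
  | [] => counts
  | r :: rest =>
    if r.1 ≤ number ∧ number ≤ r.2 then counts.modify i (· + 1)
    else pvInnerA number counts (i + 1) rest

def count_numbers_in_ranges (numbers : List Int) (ranges : List (Int × Int)) : List Int :=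
  numbers.foldl (fun counts number => pvInnerA number counts 0 ranges)
    (List.replicate ranges.length 0)

-- ===== PORT B =====
-- inner 'for n in remaining: if lo <= n <= hi: c += 1 else: kept.append(n)'
def pvSieveStep (lo hi : Int) (remaining : List Int) : Int × List Int :=
  remaining.foldl
    (fun (s : Int × List Int) n =>
      if lo ≤ n ∧ n ≤ hi then (s.1 + 1, s.2) else (s.1, s.2 ++ [n]))
    (0, [])

-- outer 'for lo, hi in ranges: … counts.append(c); remaining = kept'
def pvSieveAux (remaining : List Int) (rs : List (Int × Int)) : List Int :=
  match rs with
  | [] => []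
  | (lo, hi) :: rest =>
    let ck := pvSieveStep lo hi remaining
    ck.1 :: pvSieveAux ck.2 rest

def count_numbers_in_ranges_alt (numbers : List Int) (ranges : List (Int × Int)) : List Int :=
  pvSieveAux numbers ranges

-- ===== PRECONDITION & SPEC =====
def Spec_count_numbers_in_ranges (numbers : List Int) (ranges : List (Int × Int)) (out : List Int) : Prop := out = count_numbers_in_ranges_alt numbers ranges
instance (numbers : List Int) (ranges : List (Int × Int)) (out : List Int) : Decidable (Spec_count_numbers_in_ranges numbers ranges out) := by unfold Spec_count_numbers_in_ranges; infer_instance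

-- ===== CLAIM (what is proved, stated in full; the proofs are below) =====
def Claim_equal_count_numbers_in_ranges : Prop := ∀ (numbers : List Int) (ranges : List (Int × Int)), Dom_count_numbers_in_ranges numbers ranges → Spec_count_numbers_in_ranges numbers ranges (count_numbers_in_ranges numbers ranges)

-- ===== LEMMAS AND PROOFS =====

-- index of the first range (in rs, offset i) containing number — the common yardstick
def pvFirstMatchAux (number : Int) (i : Nat) (rs : List (Int × Int)) : Option Nat :=
  match rs with
  | [] => none
  | (lo, hi) :: rest =>
    if lo ≤ number ∧ number ≤ hi then some i else pvFirstMatchAux number (i + 1) rest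

theorem pvFirstMatchAux_shift (number : Int) (rs : List (Int × Int)) :
    ∀ i : Nat, pvFirstMatchAux number i rs = (pvFirstMatchAux number 0 rs).map (i + ·) := by
  induction rs with
  | nil => intro i; rfl
  | cons r rest ih =>
    intro i
    obtain ⟨lo, hi⟩ := r
    simp only [pvFirstMatchAux]
    split_ifs with h
    · simp
    · rw [ih (i + 1), ih 1, Option.map_map]
      cases pvFirstMatchAux number 0 rest
      · simp
      · simp only [Option.map_some, Function.comp_apply]
        congr 1
        omega

-- A's inner loop is: locate the first matching index, then bump it (or do nothing).
theorem pvInnerA_eq_firstMatch (number : Int) (rs : List (Int × Int)) :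
    ∀ (i : Nat) (counts : List Int),
      pvInnerA number counts i rs =
        match pvFirstMatchAux number i rs with
        | some j => counts.modify j (· + 1)
        | none => counts := by
  induction rs with
  | nil => intro i counts; rfl
  | cons r rest ih =>
    intro i counts
    simp only [pvInnerA, pvFirstMatchAux]
    split_ifs with h <;> simp [ih]

-- the fold of A's outer loop, read pointwise
theorem foldlA_getElem? (ranges : List (Int × Int)) (numbers : List Int) :
    ∀ (counts : List Int) (j : Nat),
      (numbers.foldl (fun c n => pvInnerA n c 0 ranges) counts)[j]? =
        counts[j]?.map (fun v => v + (numbers.countP (fun n => pvFirstMatchAux n 0 ranges == some j) : Int)) := by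
  induction numbers with
  | nil => intro counts j; cases h : counts[j]? <;> simp [h]
  | cons n ns ih =>
    intro counts j
    simp only [List.foldl_cons, ih, List.countP_cons]
    rw [pvInnerA_eq_firstMatch]
    cases h : pvFirstMatchAux n 0 ranges with
    | none => cases hc : counts[j]? <;> simp
    | some k =>
      by_cases hk : k = j
      · subst hk
        simp only [List.getElem?_modify]
        cases hc : counts[k]? <;> simp [add_comm, add_assoc]
      · simp only [List.getElem?_modify, hk]
        have hb : (some k == some j) = false := by simp [hk]
        cases hc : counts[j]? <;> simp [hb]

-- so A equals the canonical counts list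
theorem countA_eq (numbers : List Int) (ranges : List (Int × Int)) :
    count_numbers_in_ranges numbers ranges =
      (List.range ranges.length).map
        (fun j => (numbers.countP (fun n => pvFirstMatchAux n 0 ranges == some j) : Int)) := by
  apply List.ext_getElem?
  intro j
  unfold count_numbers_in_ranges
  rw [foldlA_getElem?]
  by_cases hj : j < ranges.length
  · rw [List.getElem?_map, List.getElem?_range hj, List.getElem?_replicate]
    simp [hj]
  · rw [List.getElem?_map]
    simp [hj]

-- B's inner loop is a count plus a filter
theorem pvSieveStep_eq (lo hi : Int) (remaining : List Int) :
    pvSieveStep lo hi remaining =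
      ((remaining.countP (fun n => decide (lo ≤ n ∧ n ≤ hi)) : Int),
       remaining.filter (fun n => !decide (lo ≤ n ∧ n ≤ hi))) := by
  unfold pvSieveStep
  suffices h : ∀ (l : List Int) (c : Int) (acc : List Int),
      l.foldl (fun (s : Int × List Int) n =>
        if lo ≤ n ∧ n ≤ hi then (s.1 + 1, s.2) else (s.1, s.2 ++ [n])) (c, acc) =
      (c + (l.countP (fun n => decide (lo ≤ n ∧ n ≤ hi)) : Int),
       acc ++ l.filter (fun n => !decide (lo ≤ n ∧ n ≤ hi))) by
    rw [h]; simp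
  intro l
  induction l with
  | nil => intro c acc; simp
  | cons n ns ih =>
    intro c acc
    simp only [List.foldl_cons, List.countP_cons, List.filter_cons]
    by_cases h : lo ≤ n ∧ n ≤ hi
    · simp [h, ih, add_comm, add_assoc]
    · simp [h, ih]

-- B equals the canonical counts list
theorem pvSieveAux_eq (rs : List (Int × Int)) :
    ∀ remaining : List Int,
      pvSieveAux remaining rs =
        (List.range rs.length).map
          (fun j => (remaining.countP (fun n => pvFirstMatchAux n 0 rs == some j) : Int)) := by
  induction rs with
  | nil => intro remaining; rfl
  | cons r rest ih =>
    intro remaining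
    obtain ⟨lo, hi⟩ := r
    simp only [pvSieveAux, pvSieveStep_eq, List.length_cons, List.range_succ_eq_map,
      List.map_cons, List.map_map, ih]
    congr 1
    · -- head: count of matches = count of first-match-index-0
      congr 1
      apply List.countP_congr
      intro n _
      simp only [pvFirstMatchAux]
      split_ifs with h
      · simp [h]
      · rw [pvFirstMatchAux_shift n rest 1]
        cases pvFirstMatchAux n 0 rest <;> simp [h]
    · -- tail
      apply List.map_congr_left
      intro j _
      simp only [Function.comp]
      rw [List.countP_filter]
      congr 1
      apply List.countP_congr
      intro n _
      simp only [pvFirstMatchAux, Bool.and_comm]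
      split_ifs with h
      · simp [h]
      · rw [pvFirstMatchAux_shift n rest 1]
        cases pvFirstMatchAux n 0 rest
        · simp [h]
        · simp [h]
          omega

-- ===== VERDICT (by name: the statement is the Claim_ definition above) =====
theorem count_numbers_in_ranges_spec : Claim_equal_count_numbers_in_ranges := by
  unfold Claim_equal_count_numbers_in_ranges
  intro numbers ranges _
  unfold Spec_count_numbers_in_ranges count_numbers_in_ranges_alt
  rw [countA_eq, pvSieveAux_eq]
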